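-- pv_equiv track=rewrite | github.com/tagore8661/accenture-coding-practice | Problem-25.py | find_rhyming_word
-- ===== SOURCE A (Python) =====
-- def find_rhyming_word(S, D):
--     # Initialize variables to keep track of the best rhyming word and maximum suffix length
--     best_rhyme = "No Word"
--     max_suffix_length = 0
--
--     # Iterate through each word in the dictionary D
--     for word in D:
--         # Check the length of the smaller word (between S and the word from D)
--         max_possible_suffix = min(len(S), len(word))
--
--         # Find the longest suffix match for the current word
--         for i in range(1, max_possible_suffix + 1):
--             # Check if the suffixes of length i match
--             if S[-i:] == word[-i:]:
--                 # If a longer matching suffix is found, update the best rhyme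
--                 if i > max_suffix_length:
--                     max_suffix_length = i
--                     best_rhyme = word
--             else:
--                 # If a mismatch is found, stop checking further for this word
--                 break
--
--     return best_rhyme
-- ===== SOURCE B (Python) =====
-- def _common(a, b):
--     # length of the longest common prefix of two sequences
--     k = 0
--     for x, y in zip(a, b):
--         if x != y:
--             break
--         k += 1
--     return k
--
-- def find_rhyming_word(S, D):
--     # Compare reversed strings character by character: one linear scan per word
--     # instead of re-comparing a growing suffix slice at every length.
--     rs = S[::-1]
--     best, best_len = "No Word", 0
--     for w in D:
--         k = _common(rs, w[::-1])
--         if k > best_len: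
--             best, best_len = w, k
--     return best
-- ===== Notes on version B (the rewrite author's own statement) =====
-- stated objective: alternative
-- what changed: B reverses S and each word once and counts the common prefix of the reversed strings in a single character-by-character scan, instead of A's inner loop that re-compares a fresh suffix slice of every length 1..min(len); asymptotically O(m) vs O(m^2) per word, but not measurably faster on random inputs where suffixes diverge immediately.
import Mathlib
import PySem

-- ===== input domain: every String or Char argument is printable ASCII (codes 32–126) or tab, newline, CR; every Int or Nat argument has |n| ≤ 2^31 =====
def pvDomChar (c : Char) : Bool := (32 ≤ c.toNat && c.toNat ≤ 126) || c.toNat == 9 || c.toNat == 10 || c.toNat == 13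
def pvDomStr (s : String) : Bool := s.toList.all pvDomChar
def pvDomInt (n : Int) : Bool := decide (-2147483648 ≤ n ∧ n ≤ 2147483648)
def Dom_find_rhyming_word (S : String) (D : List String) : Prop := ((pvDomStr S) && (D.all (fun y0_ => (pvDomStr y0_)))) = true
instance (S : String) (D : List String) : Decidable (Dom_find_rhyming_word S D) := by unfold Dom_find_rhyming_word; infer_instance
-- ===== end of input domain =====

-- B reverses S and each word once and counts the common prefix of the reversals in one
-- linear scan, instead of A's re-comparison of a fresh suffix slice for every length (alternative decomposition).


-- ===== PORT A =====
-- inner 'for i in range(1, max_possible_suffix + 1): … else break' loop; rem = iterations left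
def findLoopA (s w : List Char) (word : String) (i rem : Nat) (best : String) (mx : Nat) :
    String × Nat :=
  match rem with
  | 0 => (best, mx)
  | rem' + 1 =>
    if PySem.List.slice s (some (-(i : Int))) none
         == PySem.List.slice w (some (-(i : Int))) none then
      if mx < i then findLoopA s w word (i + 1) rem' word i
      else findLoopA s w word (i + 1) rem' best mx
    else (best, mx)

def find_rhyming_word (S : String) (D : List String) : String :=
  (D.foldl (fun st word =>
      let m := min S.toList.length word.toList.length
      findLoopA S.toList word.toList word 1 m st.1 st.2)
    ("No Word", 0)).1

-- ===== PORT B =====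
-- _common: zip-and-break common-prefix counter
def prefLen : List Char → List Char → Nat
  | x :: xs, y :: ys => if x == y then prefLen xs ys + 1 else 0
  | _, _ => 0

def find_rhyming_word_alt (S : String) (D : List String) : String :=
  let rs := S.toList.reverse
  (D.foldl (fun st w =>
      let k := prefLen rs w.toList.reverse
      if st.2 < k then (w, k) else st)
    ("No Word", 0)).1

-- ===== PRECONDITION & SPEC =====
def Spec_find_rhyming_word (S : String) (D : List String) (out : String) : Prop := out = find_rhyming_word_alt S D
instance (S : String) (D : List String) (out : String) : Decidable (Spec_find_rhyming_word S D out) := by unfold Spec_find_rhyming_word; infer_instance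

-- ===== CLAIM (what is proved, stated in full; the proofs are below) =====
def Claim_equal_find_rhyming_word : Prop := ∀ (S : String) (D : List String), Dom_find_rhyming_word S D → Spec_find_rhyming_word S D (find_rhyming_word S D)

-- ===== LEMMAS AND PROOFS =====

theorem prefLen_le_left (a b : List Char) : prefLen a b ≤ a.length := by
  induction a generalizing b with
  | nil => simp [prefLen]
  | cons x xs ih =>
    cases b with
    | nil => simp [prefLen]
    | cons y ys =>
      simp only [prefLen]
      split
      · simpa using ih ys
      · simp

theorem prefLen_le_right (a b : List Char) : prefLen a b ≤ b.length := by
  induction a generalizing b with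
  | nil => simp [prefLen]
  | cons x xs ih =>
    cases b with
    | nil => simp [prefLen]
    | cons y ys =>
      simp only [prefLen]
      split
      · simpa using ih ys
      · simp

theorem take_eq_iff_le_prefLen (a b : List Char) (i : Nat)
    (ha : i ≤ a.length) (hb : i ≤ b.length) :
    (a.take i = b.take i) ↔ i ≤ prefLen a b := by
  induction i generalizing a b with
  | zero => simp
  | succ n ih =>
    cases a with
    | nil => simp at ha
    | cons x xs =>
      cases b with
      | nil => simp at hb
      | cons y ys =>
        simp only [List.take_succ_cons, List.cons.injEq, prefLen]
        by_cases hxy : x = y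
        · simp only [hxy, beq_self_eq_true, if_true, true_and]
          rw [ih xs ys (by simpa using ha) (by simpa using hb)]
          omega
        · simp [hxy, beq_eq_false_iff_ne.mpr hxy]

-- the suffix-slice test of A at length i decides i ≤ prefLen of the reversals
theorem slice_test_eq (s w : List Char) (i : Nat) (h1 : 1 ≤ i)
    (hs : i ≤ s.length) (hw : i ≤ w.length) :
    (PySem.List.slice s (some (-(i : Int))) none
       == PySem.List.slice w (some (-(i : Int))) none)
      = decide (i ≤ prefLen s.reverse w.reverse) := by
  have cs : PySem.List.clampIdx s.length (-(i : Int)) = s.length - i := by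
    simp [PySem.List.clampIdx]; split_ifs <;> omega
  have cw : PySem.List.clampIdx w.length (-(i : Int)) = w.length - i := by
    simp [PySem.List.clampIdx]; split_ifs <;> omega
  rw [PySem.List.slice_some_none, PySem.List.slice_some_none, cs, cw]
  have hds : s.drop (s.length - i) = (s.reverse.take i).reverse := by
    rw [List.take_reverse, List.reverse_reverse]
  have hdw : w.drop (w.length - i) = (w.reverse.take i).reverse := by
    rw [List.take_reverse, List.reverse_reverse]
  rw [hds, hdw]
  have : (s.reverse.take i).reverse = (w.reverse.take i).reverse ↔
      i ≤ prefLen s.reverse w.reverse := by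
    rw [List.reverse_inj]
    exact take_eq_iff_le_prefLen _ _ _ (by simpa using hs) (by simpa using hw)
  by_cases h : i ≤ prefLen s.reverse w.reverse
  · simp [this.mpr h, h]
  · have hne : (s.reverse.take i).reverse ≠ (w.reverse.take i).reverse :=
      fun he => h (this.mp he)
    simp [h, beq_eq_false_iff_ne.mpr hne]

theorem findLoopA_spec (s w : List Char) (word : String) :
    ∀ (rem i : Nat) (best : String) (mx : Nat), 1 ≤ i →
      i + rem = min s.length w.length + 1 →
      findLoopA s w word i rem best mx =
        (if i ≤ prefLen s.reverse w.reverse ∧ mx < prefLen s.reverse w.reverse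
         then (word, prefLen s.reverse w.reverse) else (best, mx)) := by
  intro rem
  set L := prefLen s.reverse w.reverse with hL
  have hLm : L ≤ min s.length w.length := by
    have h1 := prefLen_le_left s.reverse w.reverse
    have h2 := prefLen_le_right s.reverse w.reverse
    simp only [List.length_reverse] at h1 h2
    omega
  induction rem with
  | zero =>
    intro i best mx h1 hsum
    have : ¬ (i ≤ L) := by omega
    simp [findLoopA, this]
  | succ rem' ih =>
    intro i best mx h1 hsum
    have his : i ≤ s.length := by omega
    have hiw : i ≤ w.length := by omega
    simp only [findLoopA]
    rw [slice_test_eq s w i h1 his hiw, ← hL]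
    by_cases hmatch : i ≤ L
    · simp only [hmatch, decide_true, if_true]
      by_cases hup : mx < i
      · rw [if_pos hup, ih (i + 1) word i (by omega) (by omega)]
        split_ifs with hc <;> simp_all <;> omega
      · rw [if_neg hup, ih (i + 1) best mx (by omega) (by omega)]
        split_ifs with hc hd <;> simp_all <;> omega
    · simp [hmatch]

theorem step_eq (S : String) (st : String × Nat) (word : String) :
    (let m := min S.toList.length word.toList.length
     findLoopA S.toList word.toList word 1 m st.1 st.2) =
    (let k := prefLen S.toList.reverse word.toList.reverse
     if st.2 < k then (word, k) else st) := by
  simp only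
  rw [findLoopA_spec S.toList word.toList word (min S.toList.length word.toList.length) 1
      st.1 st.2 (le_refl 1) (by omega)]
  set L := prefLen S.toList.reverse word.toList.reverse
  split_ifs with h1 h2 h2 <;> first | rfl | omega

-- ===== VERDICT (by name: the statement is the Claim_ definition above) =====
theorem find_rhyming_word_spec : Claim_equal_find_rhyming_word := by
  intro S D _
  unfold Spec_find_rhyming_word find_rhyming_word find_rhyming_word_alt
  have h : (fun (st : String × Nat) (word : String) =>
      let m := min S.toList.length word.toList.length
      findLoopA S.toList word.toList word 1 m st.1 st.2) =
    (fun (st : String × Nat) (w : String) =>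
      let k := prefLen S.toList.reverse w.toList.reverse
      if st.2 < k then (w, k) else st) := by
    funext st word; exact step_eq S st word
  rw [h]
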